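-- pv_equiv track=rewrite | github.com/hmseaborn90/CodeChallenges | Python/incorrect_passcode_attempts.py | incorrectPasscodeAttempts
-- ===== SOURCE A (Python) =====
-- def incorrectPasscodeAttempts(passcode, attempts):
--     count = 0
--     for password in attempts:
--         failed = False
--         if password != passcode:
--             count += 1
--             failed = True
--         if count == 10:
--             return True
--         if not failed:
--             count = 0
--     return False
-- ===== SOURCE B (Python) =====
-- def incorrectPasscodeAttempts(passcode, attempts):
--     mask = [p != passcode for p in attempts]
--     return any(all(mask[i:i + 10]) for i in range(len(mask) - 9))
-- ===== Notes on version B (the rewrite author's own statement) =====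
-- stated objective: alternative
-- what changed: Replaced A's streaming reset-on-success counter with early return by a staged brute-force check: build the failure mask once, then test every length-10 window of consecutive attempts for being all failures.
import Mathlib
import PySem

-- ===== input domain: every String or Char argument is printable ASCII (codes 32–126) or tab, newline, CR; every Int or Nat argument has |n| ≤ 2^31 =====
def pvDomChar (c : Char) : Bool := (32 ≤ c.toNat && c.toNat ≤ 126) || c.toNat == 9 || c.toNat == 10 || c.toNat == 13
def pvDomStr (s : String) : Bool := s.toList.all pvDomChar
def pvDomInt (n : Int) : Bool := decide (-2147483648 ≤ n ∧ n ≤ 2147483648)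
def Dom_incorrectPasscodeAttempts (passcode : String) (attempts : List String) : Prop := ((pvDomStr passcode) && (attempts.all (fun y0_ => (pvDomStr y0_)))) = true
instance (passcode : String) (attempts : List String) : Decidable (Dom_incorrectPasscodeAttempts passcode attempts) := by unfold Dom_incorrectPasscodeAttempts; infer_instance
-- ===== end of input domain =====

-- B replaces A's streaming reset-on-success counter (with early return) by a staged
-- brute-force check: build the failure mask once, then test every length-10 window of
-- consecutive attempts for being all failures; objective: alternative (not faster).

-- ===== PORT A =====
-- the for-loop of A, with the running counter `count` as explicit state
def pvAAux (passcode : String) (count : Int) : List String → Bool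
  | [] => false
  | password :: rest =>
    let failed := password != passcode
    let count := if password != passcode then count + 1 else count
    if count == 10 then true
    else if !failed then pvAAux passcode 0 rest
    else pvAAux passcode count rest

def incorrectPasscodeAttempts (passcode : String) (attempts : List String) : Bool :=
  pvAAux passcode 0 attempts

-- ===== PORT B =====
-- mask = [p != passcode for p in attempts]; any(all(mask[i:i+10]) for i in range(len(mask)-9))
def incorrectPasscodeAttempts_alt (passcode : String) (attempts : List String) : Bool :=
  let mask := attempts.map (fun p => p != passcode)
  (PySem.List.pyRange 0 ((mask.length : Int) - 9) 1).any
    (fun i => (PySem.List.slice mask (some i) (some (i + 10))).all id)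

-- ===== PRECONDITION & SPEC =====
def Spec_incorrectPasscodeAttempts (passcode : String) (attempts : List String) (out : Bool) : Prop := out = incorrectPasscodeAttempts_alt passcode attempts
instance (passcode : String) (attempts : List String) (out : Bool) : Decidable (Spec_incorrectPasscodeAttempts passcode attempts out) := by unfold Spec_incorrectPasscodeAttempts; infer_instance

-- ===== CLAIM (what is proved, stated in full; the proofs are below) =====
def Claim_equal_incorrectPasscodeAttempts : Prop := ∀ (passcode : String) (attempts : List String), Dom_incorrectPasscodeAttempts passcode attempts → Spec_incorrectPasscodeAttempts passcode attempts (incorrectPasscodeAttempts passcode attempts)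

-- ===== LEMMAS AND PROOFS =====

-- reference predicate: some suffix of the mask starts with ≥ 10 consecutive `true`s
def has10 : List Bool → Bool
  | [] => false
  | b :: bs => decide (10 ≤ ((b :: bs).takeWhile id).length) || has10 bs

theorem has10_false_cons (bs : List Bool) : has10 (false :: bs) = has10 bs := by
  simp [has10, List.takeWhile]

-- peel off the leading run of `true`s
theorem has10_split (bl : List Bool) :
    has10 bl = (decide (10 ≤ (bl.takeWhile id).length) || has10 (bl.dropWhile id)) := by
  induction bl with
  | nil => simp [has10]
  | cons b bs ih =>
    cases b with
    | false => simp [has10_false_cons, List.takeWhile, List.dropWhile]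
    | true =>
      show (decide (10 ≤ ((true :: bs).takeWhile id).length) || has10 bs) = _
      rw [ih]
      simp only [List.takeWhile, List.dropWhile, id, List.length_cons]
      by_cases h : 10 ≤ (bs.takeWhile id).length
      · have h1 : 10 ≤ (bs.takeWhile id).length + 1 := by omega
        simp [h, h1]
      · simp [h]

-- a run of length m at the front iff the first m entries are all true (m within length)
theorem take_all_iff_lead (m : Nat) (bl : List Bool) (hm : m ≤ bl.length) :
    (bl.take m).all id = decide (m ≤ (bl.takeWhile id).length) := by
  induction bl generalizing m with
  | nil =>
    have hm0 : m = 0 := by simpa using hm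
    subst hm0
    simp
  | cons b bs ih =>
    cases m with
    | zero => simp
    | succ m =>
      cases b with
      | false => simp [List.takeWhile]
      | true =>
        have := ih m (by simpa using hm)
        simp only [List.take_succ_cons, List.all_cons, List.takeWhile, id,
          List.length_cons, this]
        by_cases h : m ≤ (bs.takeWhile id).length
        · have h1 : m + 1 ≤ (bs.takeWhile id).length + 1 := by omega
          simp [h, h1]
        · have h1 : ¬ m + 1 ≤ (bs.takeWhile id).length + 1 := by omega
          simp [h, h1]

-- the brute-force window scan computes has10
theorem wnd_eq_has10 (bl : List Bool) :
    (List.range (bl.length - 9)).any (fun k => ((bl.drop k).take 10).all id) = has10 bl := by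
  induction bl with
  | nil => simp [has10]
  | cons b bs ih =>
    by_cases hle : (b :: bs).length ≤ 9
    · -- fewer than 10 attempts remain anywhere: both sides false
      have h0 : (b :: bs).length - 9 = 0 := by omega
      rw [h0]
      have hbs : bs.length - 9 = 0 := by simp at hle; omega
      have hh : has10 bs = false := by rw [← ih, hbs]; simp
      have hlead : ¬ 10 ≤ (((b :: bs).takeWhile id).length) := by
        have := (List.takeWhile_sublist (l := b :: bs) (p := id)).length_le
        simp at hle ⊢
        omega
      simp [has10, hh, hlead]
    · have hlt : 9 < (b :: bs).length := by omega
      -- at least 10 attempts: split off the window at index 0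
      have hn : (b :: bs).length - 9 = (bs.length - 9) + 1 := by simp at hlt ⊢; omega
      rw [hn, List.range_succ_eq_map]
      simp only [List.any_cons, List.any_map, Function.comp_def, Nat.succ_eq_add_one]
      have hwin0 : (((b :: bs).drop 0).take 10).all id
          = decide (10 ≤ ((b :: bs).takeWhile id).length) := by
        simpa using take_all_iff_lead 10 (b :: bs) (by omega)
      have hrest : (List.range (bs.length - 9)).any
          (fun k => (((b :: bs).drop (k + 1)).take 10).all id) = has10 bs := by
        rw [← ih]
        rfl
      rw [hwin0, hrest, has10]

-- main invariant for A's loop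
theorem pvAAux_eq (passcode : String) (l : List String) :
    ∀ c : Int, 0 ≤ c → c < 10 →
      pvAAux passcode c l =
        (decide ((10 : Int) ≤ c + ((l.map (fun p => p != passcode)).takeWhile id).length)
          || has10 ((l.map (fun p => p != passcode)).dropWhile id)) := by
  induction l with
  | nil =>
    intro c hc0 hc10
    simp only [pvAAux, List.map_nil, List.takeWhile_nil, List.dropWhile_nil, List.length_nil,
      Nat.cast_zero, add_zero, has10, Bool.or_false]
    symm
    simp only [decide_eq_false_iff_not]
    omega
  | cons s ls ih =>
    intro c hc0 hc10
    by_cases h : (s != passcode) = true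
    · -- failed attempt
      simp only [pvAAux, h, List.map_cons, List.takeWhile_cons, List.dropWhile_cons, id,
        if_pos, List.length_cons, Bool.not_true, Bool.false_eq_true, if_false]
      by_cases h10 : c + 1 = 10
      · have he : (c + 1 == (10 : Int)) = true := by simp [h10]
        simp only [he, if_true]
        symm
        rw [Bool.or_eq_true]
        left
        rw [decide_eq_true_eq]
        have hlen : (0 : Int) ≤ ((ls.map (fun p => p != passcode)).takeWhile id).length := by
          positivity
        omega
      · have hne : (c + 1 == (10 : Int)) = false := by simp [h10]
        simp only [hne, Bool.false_eq_true, if_false]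
        rw [ih (c + 1) (by omega) (by omega)]
        congr 1
        rw [decide_eq_decide]
        push_cast
        omega
    · -- correct attempt: count reset
      have hs : (s != passcode) = false := by simpa using h
      have hcne : (c == (10 : Int)) = false := by simp; omega
      simp only [pvAAux, hs, List.map_cons, List.takeWhile_cons, List.dropWhile_cons, id,
        Bool.false_eq_true, if_false, hcne, Bool.not_false, if_true,
        List.length_nil, Nat.cast_zero, add_zero]
      rw [ih 0 le_rfl (by norm_num)]
      have hc : decide ((10 : Int) ≤ c) = false := by
        simp only [decide_eq_false_iff_not]; omega
      rw [hc, Bool.false_or, has10_false_cons]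
      rw [has10_split (ls.map (fun p => p != passcode))]
      congr 1
      rw [decide_eq_decide]
      omega

-- the Int range/slice of the B port reduces to the Nat window scan
theorem alt_eq_wnd (passcode : String) (attempts : List String) :
    incorrectPasscodeAttempts_alt passcode attempts =
      (List.range ((attempts.map (fun p => p != passcode)).length - 9)).any
        (fun k => (((attempts.map (fun p => p != passcode)).drop k).take 10).all id) := by
  unfold incorrectPasscodeAttempts_alt
  dsimp only
  rw [PySem.List.pyRange_one]
  simp only [List.any_map, Function.comp_def]
  have hlen : (((attempts.map (fun p => p != passcode)).length : Int) - 9 - 0).toNat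
      = (attempts.map (fun p => p != passcode)).length - 9 := by omega
  rw [hlen]
  congr 1
  funext k
  have h10 : ((0 : Int) + (k : Int)) + 10 = ((k + 10 : Nat) : Int) := by push_cast; ring
  have h0 : ((0 : Int) + (k : Int)) = ((k : Nat) : Int) := by omega
  rw [h10, h0, PySem.List.slice_natCast]
  congr 2
  omega

-- ===== VERDICT (by name: the statement is the Claim_ definition above) =====
theorem incorrectPasscodeAttempts_spec : Claim_equal_incorrectPasscodeAttempts := by
  intro passcode attempts _
  unfold Spec_incorrectPasscodeAttempts incorrectPasscodeAttempts
  rw [alt_eq_wnd, wnd_eq_has10, pvAAux_eq passcode attempts 0 le_rfl (by norm_num)]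
  rw [has10_split (attempts.map (fun p => p != passcode))]
  congr 1
  rw [decide_eq_decide]
  omega
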